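-- pv_equiv track=rewrite | github.com/Mushfiqur-Rahman-Robin/leetcode-practice | python/2138-Divide-a-String-Into-Groups-of-Size-k.py | divideString
-- ===== SOURCE A (Python) =====
-- from typing import List
--
-- def divideString(s: str, k: int, fill: str) -> List[str]:
--     arr = []
--
--     remainder = len(s) % k
--     if remainder != 0:
--         s += fill * (k - remainder)
--
--     for i in range(0, len(s), k):
--         arr.append(s[i:i+k])
--
--     return arr
-- ===== SOURCE B (Python) =====
-- from typing import List
--
-- def divideString(s: str, k: int, fill: str) -> List[str]:
--     pad = -len(s) % k
--     arr = []
--     group = []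
--     for ch in s + fill * pad:
--         group.append(ch)
--         if len(group) == k:
--             arr.append("".join(group))
--             group = []
--     if group:
--         arr.append("".join(group))
--     return arr
-- ===== Notes on version B (the rewrite author's own statement) =====
-- stated objective: alternative
-- what changed: A conditionally pre-pads the whole string and then slices it by index with range(0, len, k); B computes the pad count in closed form (-len(s) % k) and builds the groups in a single character-by-character accumulator pass with no index arithmetic or slicing.
-- outside the precondition, e.g. on divideString('abc', -2, 'x'): A returns [], B returns ['abc']
import Mathlib
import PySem

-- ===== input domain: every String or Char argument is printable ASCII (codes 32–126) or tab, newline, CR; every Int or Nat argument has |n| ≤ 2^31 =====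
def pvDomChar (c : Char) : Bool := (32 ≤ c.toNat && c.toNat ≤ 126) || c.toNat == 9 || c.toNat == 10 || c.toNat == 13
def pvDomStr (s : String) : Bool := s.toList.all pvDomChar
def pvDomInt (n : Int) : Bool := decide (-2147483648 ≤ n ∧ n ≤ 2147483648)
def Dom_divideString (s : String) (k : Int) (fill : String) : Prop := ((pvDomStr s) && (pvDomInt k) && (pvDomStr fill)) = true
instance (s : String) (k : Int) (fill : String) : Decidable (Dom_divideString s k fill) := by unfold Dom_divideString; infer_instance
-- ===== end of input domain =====

-- B replaces A's conditional pre-pad + index/slice loop with a closed-form pad count and a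
-- single character-accumulator pass (objective: alternative, same cost).


-- ===== PORT A =====
-- Python's `str * int`: n concatenated copies, "" for n ≤ 0 (exact; PySem has no string-repeat primitive)
def pyStrMul (cs : List Char) (n : Int) : List Char := if cs.isEmpty then [] else (List.replicate n.toNat cs).flatten

def divideString (s : String) (k : Int) (fill : String) : List String :=
  let cs := s.toList
  let remainder := PySem.Int.mod (cs.length : Int) k
  let cs2 := if remainder ≠ 0 then cs ++ pyStrMul fill.toList (k - remainder) else cs
  (PySem.List.pyRange 0 (cs2.length : Int) k).foldl
    (fun arr i => arr ++ [String.ofList (PySem.List.slice cs2 (some i) (some (i + k)))]) []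

-- ===== PORT B =====
def divideString_alt (s : String) (k : Int) (fill : String) : List String :=
  let padded := s.toList ++ pyStrMul fill.toList (PySem.Int.mod (-(s.toList.length : Int)) k)
  let res := padded.foldl
    (fun (st : List String × List Char) ch =>
      let g := st.2 ++ [ch]
      if (g.length : Int) = k then (st.1 ++ [String.ofList g], []) else (st.1, g))
    ([], [])
  if res.2.isEmpty then res.1 else res.1 ++ [String.ofList res.2]

-- ===== PRECONDITION & SPEC =====
-- Pre_ excludes k ≤ 0: at k = 0 A raises ZeroDivisionError; for k < 0 A's value [] is an
-- accident of range's negative step on a negative group size (outside the function's natural domain).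
def Pre_divideString (s : String) (k : Int) (fill : String) : Prop := 0 < k
instance (s : String) (k : Int) (fill : String) : Decidable (Pre_divideString s k fill) := by unfold Pre_divideString; infer_instance
def pvWitness_divideString : String × Int × String := ("abcdefgh", 3, "x")

def Spec_divideString (s : String) (k : Int) (fill : String) (out : List String) : Prop := out = divideString_alt s k fill
instance (s : String) (k : Int) (fill : String) (out : List String) : Decidable (Spec_divideString s k fill out) := by unfold Spec_divideString; infer_instance

-- ===== CLAIM (what is proved, stated in full; the proofs are below) =====
def Claim_equal_divideString : Prop := ∀ (s : String) (k : Int) (fill : String), Dom_divideString s k fill → Pre_divideString s k fill → Spec_divideString s k fill (divideString s k fill)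

-- ===== LEMMAS AND PROOFS =====

-- groups of size kn+1 (last one possibly shorter): the common normal form of both loops
def chunksP (kn : Nat) : List Char → List String
  | [] => []
  | c :: cs => String.ofList (List.take (kn + 1) (c :: cs)) :: chunksP kn (List.drop kn cs)
  termination_by l => l.length
  decreasing_by simp

theorem chunksP_block (kn : Nat) (g t : List Char) (hg : g.length = kn + 1) :
    chunksP kn (g ++ t) = String.ofList g :: chunksP kn t := by
  cases g with
  | nil => simp at hg
  | cons c g' =>
    have hlen : g'.length = kn := by simpa using hg
    rw [List.cons_append, chunksP.eq_2]
    have h1 : List.take (kn + 1) (c :: (g' ++ t)) = c :: g' := by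
      rw [show c :: (g' ++ t) = (c :: g') ++ t from rfl,
        List.take_append_of_le_length (by simp [hlen]),
        List.take_of_length_le (by simp [hlen])]
    have h2 : List.drop kn (g' ++ t) = t := by
      rw [List.drop_append_of_le_length (by omega), List.drop_of_length_le (by omega)]
      simp
    rw [h1, h2]

theorem pyRange_shift (a b s : Int) (hs : 0 < s) :
    PySem.List.pyRange a b s = (PySem.List.pyRange 0 (b - a) s).map (fun x => x + a) := by
  rw [PySem.List.pyRange_of_pos _ _ hs, PySem.List.pyRange_of_pos _ _ hs, List.map_map]
  have hif : (if a < b then ((b - a + s - 1) / s).toNat else 0)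
      = (if (0:Int) < b - a then ((b - a - 0 + s - 1) / s).toNat else 0) := by
    have h1 : (a < b) ↔ ((0:Int) < b - a) := by omega
    have h2 : b - a - 0 = b - a := by ring
    rw [h2]
    by_cases h : a < b
    · rw [if_pos h, if_pos (h1.mp h)]
    · rw [if_neg h, if_neg (fun hh => h (h1.mpr hh))]
  rw [hif]
  exact List.map_congr_left (fun k _ => by simp; ring)

theorem pyRange_pos_cons (b s : Int) (hb : 0 < b) (hs : 0 < s) :
    PySem.List.pyRange 0 b s = 0 :: PySem.List.pyRange s b s := by
  rw [PySem.List.pyRange_of_pos _ _ hs, PySem.List.pyRange_of_pos _ _ hs]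
  have hm : (if (0:Int) < b then ((b - 0 + s - 1) / s).toNat else 0)
      = (if s < b then ((b - s + s - 1) / s).toNat else 0) + 1 := by
    rw [if_pos hb]
    by_cases h : s < b
    · rw [if_pos h]
      have key : (b - 0 + s - 1) / s = (b - s + s - 1) / s + 1 := by
        rw [show b - 0 + s - 1 = (b - s + s - 1) + 1 * s by ring,
          Int.add_mul_ediv_right _ _ (ne_of_gt hs)]
      rw [key]
      have hnn : 0 ≤ (b - s + s - 1) / s := Int.ediv_nonneg (by omega) (by omega)
      omega
    · rw [if_neg h]
      have hone : (b - 0 + s - 1) / s = 1 := by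
        rw [show b - 0 + s - 1 = (b - 1) + 1 * s by ring,
          Int.add_mul_ediv_right _ _ (ne_of_gt hs),
          Int.ediv_eq_zero_of_lt (by omega) (by omega)]
        omega
      omega
  rw [hm, List.range_succ_eq_map, List.map_cons, List.map_map]
  congr 1
  · simp
  · exact List.map_congr_left (fun k _ => by simp [Nat.succ_eq_add_one]; ring)

-- A's slicing loop computes chunksP
theorem lemA (kn : Nat) (k : Int) (hk : k = (kn : Int) + 1) :
    ∀ (n : Nat) (t : List Char), t.length = n → ∀ (acc : List String),
      (PySem.List.pyRange 0 (t.length : Int) k).foldl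
        (fun arr i => arr ++ [String.ofList (PySem.List.slice t (some i) (some (i + k)))]) acc
      = acc ++ chunksP kn t := by
  have hkpos : 0 < k := by omega
  intro n
  induction n using Nat.strong_induction_on with
  | _ n IH =>
    intro t ht acc
    cases t with
    | nil => simp [PySem.List.pyRange_of_pos _ _ hkpos, chunksP.eq_1]
    | cons c cs =>
      have hlen : ((c :: cs).length : Int) > 0 := by simp
      rw [pyRange_pos_cons _ _ hlen hkpos, List.foldl_cons]
      have hfirst : PySem.List.slice (c :: cs) (some 0) (some (0 + k)) = List.take (kn + 1) (c :: cs) := by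
        rw [PySem.List.slice_zero_start, zero_add, PySem.List.slice_to _ (le_of_lt hkpos),
          show k.toNat = kn + 1 by omega]
      rw [hfirst]
      rw [pyRange_shift _ _ _ hkpos, List.foldl_map]
      have hcong : ∀ (arr : List String), ∀ j ∈ PySem.List.pyRange 0 (((c :: cs).length : Int) - k) k,
          (arr ++ [String.ofList (PySem.List.slice (c :: cs) (some (j + k)) (some (j + k + k)))])
          = (arr ++ [String.ofList (PySem.List.slice (List.drop (kn + 1) (c :: cs)) (some j) (some (j + k)))]) := by
        intro arr j hj
        obtain ⟨hj0, -, -⟩ := (PySem.List.mem_pyRange_iff_of_pos hkpos j).mp hj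
        have h1 : (j + k).toNat = j.toNat + (kn + 1) := by omega
        have h2 : (j + k + k).toNat - (j + k).toNat = (j + k).toNat - j.toNat := by omega
        rw [PySem.List.slice_toNat _ (by omega) (by omega), PySem.List.slice_toNat _ hj0 (by omega),
          List.drop_drop, h1,
          show (j + k + k).toNat - (j.toNat + (kn + 1)) = j.toNat + (kn + 1) - j.toNat by omega,
          Nat.add_comm (kn + 1) j.toNat]
      rw [PySem.List.foldl_congr_mem _ _ _ _ hcong]
      by_cases hcase : ((c :: cs).length : Int) - k ≤ 0
      · have h1 : PySem.List.pyRange 0 (((c :: cs).length : Int) - k) k = [] := by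
          rw [PySem.List.pyRange_of_pos _ _ hkpos, if_neg (by omega)]
          simp
        have hcs : cs.length ≤ kn := by
          have hc := hcase
          simp at hc
          omega
        rw [h1, List.foldl_nil, chunksP.eq_2, List.drop_of_length_le hcs, chunksP.eq_1]
      · have hc : (kn : Int) + 1 < ((c :: cs).length : Int) := by
          have hc := hcase
          simp at hc
          omega
        have hlt : (List.drop (kn + 1) (c :: cs)).length < n := by
          rw [List.length_drop]
          omega
        have heq : ((c :: cs).length : Int) - k = (((List.drop (kn + 1) (c :: cs)).length : Int)) := by
          rw [List.length_drop]
          omega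
        rw [heq, IH _ hlt _ rfl]
        rw [chunksP.eq_2, show List.drop (kn + 1) (c :: cs) = List.drop kn cs from rfl]
        simp

-- B's accumulator loop (plus the final flush) computes chunksP
theorem lemB (kn : Nat) (k : Int) (hk : k = (kn : Int) + 1) :
    ∀ (t : List Char) (arr : List String) (g : List Char), g.length ≤ kn →
      (let res := t.foldl
          (fun (st : List String × List Char) ch =>
            let g := st.2 ++ [ch]
            if (g.length : Int) = k then (st.1 ++ [String.ofList g], []) else (st.1, g))
          (arr, g)
       if res.2.isEmpty then res.1 else res.1 ++ [String.ofList res.2])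
      = arr ++ chunksP kn (g ++ t) := by
  intro t
  induction t with
  | nil =>
    intro arr g hg
    simp only [List.foldl_nil, List.append_nil]
    cases g with
    | nil => simp [chunksP.eq_1]
    | cons c g' =>
      have hg'' : g'.length ≤ kn := by simp at hg; omega
      rw [chunksP.eq_2, List.take_of_length_le (by simp at hg ⊢; omega),
        List.drop_of_length_le hg'', chunksP.eq_1]
      simp
  | cons c t' IH =>
    intro arr g hg
    simp only [List.foldl_cons]
    by_cases hfull : (((g ++ [c]).length : Int)) = k
    · rw [if_pos hfull]
      have hglen : (g ++ [c]).length = kn + 1 := by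
        have := hfull
        simp at this ⊢
        omega
      rw [IH (arr ++ [String.ofList (g ++ [c])]) [] (by simp)]
      rw [show g ++ c :: t' = (g ++ [c]) ++ t' by simp, chunksP_block kn _ _ hglen]
      simp
    · rw [if_neg hfull]
      have hglen : (g ++ [c]).length ≤ kn := by
        simp at hfull ⊢
        omega
      rw [IH arr (g ++ [c]) hglen]
      simp

-- the two padded strings coincide
theorem pad_eq (cs fs : List Char) (k : Int) (hk : 0 < k) :
    (if PySem.Int.mod (cs.length : Int) k ≠ 0
      then cs ++ pyStrMul fs (k - PySem.Int.mod (cs.length : Int) k) else cs)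
    = cs ++ pyStrMul fs (PySem.Int.mod (-(cs.length : Int)) k) := by
  by_cases h : PySem.Int.mod (cs.length : Int) k = 0
  · rw [if_neg (by simp [h])]
    have hz : PySem.Int.mod (-(cs.length : Int)) k = 0 := by
      rw [PySem.Int.mod_eq_zero_iff_dvd] at h ⊢
      exact dvd_neg.mpr h
    rw [hz]
    simp [pyStrMul]
  · rw [if_pos h]
    congr 2
    have hd : ¬ k ∣ (cs.length : Int) := by
      intro hd
      exact h ((PySem.Int.mod_eq_zero_iff_dvd _ _).mpr hd)
    rw [PySem.Int.mod_eq_emod_of_pos hk, PySem.Int.mod_eq_emod_of_pos hk, Int.neg_emod, if_neg hd]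
    have h1 : (k.natAbs : Int) = k := by omega
    rw [h1]

-- ===== VERDICT (by name: the statement is the Claim_ definition above) =====
theorem divideString_spec : Claim_equal_divideString := by
  intro s k fill hdom hk
  have hk0 : 0 < k := hk
  unfold Spec_divideString divideString divideString_alt
  simp only []
  rw [pad_eq s.toList fill.toList k hk0]
  have hkn : k = ((k.toNat - 1 : Nat) : Int) + 1 := by omega
  rw [lemA (k.toNat - 1) k hkn _ _ rfl [], lemB (k.toNat - 1) k hkn _ [] [] (by simp)]
  simp
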